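-- pv_equiv track=rewrite | github.com/pgrachev/Master-Course-1 | NLP/HT4/main.py | beatify
-- ===== SOURCE A (Python) =====
-- def isLetter(ch):
--     return (ord('a') <= ord(ch) and ord(ch) <= ord('z'))
--
-- def isOK(ch):
--     return isLetter(ch) or ch.isdigit()
--
-- def beatify(str):
--     str = str.strip()
--     str = str.lower()
--     prevSpace = False
--     ampRegime = False
--     dogRegime = False
--     WordDeleted = False
--     res = ''
--     for ch in str:
--         if(not (ampRegime or dogRegime)):
--             if (ch == '&'):
--                 ampRegime = True
--             elif (ch == '@'):
--                 dogRegime = True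
--                 WordDeleted = False
--             elif(ch.isspace()):
--                 if(not prevSpace):
--                     res += ' '
--                     prevSpace = True
--             elif(not isOK(ch)):
--                 if(not prevSpace):
--                     res += ' '
--                     prevSpace = True
--             else:
--                 res += ch
--                 prevSpace = False
--         elif(ampRegime):
--             if(ch == ';'):
--                 ampRegime = False
--         else:
--             if isOK(ch):
--                 WordDeleted = True
--             elif (ch.isspace()):
--                 if(WordDeleted):
--                     dogRegime = False
--
--     return res.strip()
-- ===== SOURCE B (Python) =====
-- def isLetter(ch):
--     return (ord('a') <= ord(ch) and ord(ch) <= ord('z'))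
--
-- def isOK(ch):
--     return isLetter(ch) or ch.isdigit()
--
-- def beatify(str):
--     s = str.strip().lower()
--     n = len(s)
--     # pass 1: drop '&...;' entities and '@'-words, keep every other char verbatim
--     kept = []
--     i = 0
--     while i < n:
--         ch = s[i]
--         if ch == '&':
--             i += 1
--             while i < n and s[i] != ';':
--                 i += 1
--             i += 1  # skip the ';' (or run off the end)
--         elif ch == '@':
--             i += 1
--             seen = False
--             while i < n:
--                 if isOK(s[i]):
--                     seen = True
--                 elif s[i].isspace() and seen:
--                     break
--                 i += 1
--             i += 1  # consume the terminating whitespace (or run off the end)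
--         else:
--             kept.append(ch)
--             i += 1
--     # pass 2: collapse each maximal run of non-OK chars into a single space
--     out = []
--     m = len(kept)
--     j = 0
--     while j < m:
--         if isOK(kept[j]):
--             out.append(kept[j])
--             j += 1
--         else:
--             out.append(' ')
--             while j < m and not isOK(kept[j]):
--                 j += 1
--     return ''.join(out).strip()
-- ===== Notes on version B (the rewrite author's own statement) =====
-- stated objective: simpler
-- what changed: A's single five-flag combined state machine is split into two independent passes: a removal-only scan that drops '&...;' entities and '@'-words via dedicated inner loops, followed by a pass that collapses each maximal run of non-OK characters into one space.
import Mathlib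
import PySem

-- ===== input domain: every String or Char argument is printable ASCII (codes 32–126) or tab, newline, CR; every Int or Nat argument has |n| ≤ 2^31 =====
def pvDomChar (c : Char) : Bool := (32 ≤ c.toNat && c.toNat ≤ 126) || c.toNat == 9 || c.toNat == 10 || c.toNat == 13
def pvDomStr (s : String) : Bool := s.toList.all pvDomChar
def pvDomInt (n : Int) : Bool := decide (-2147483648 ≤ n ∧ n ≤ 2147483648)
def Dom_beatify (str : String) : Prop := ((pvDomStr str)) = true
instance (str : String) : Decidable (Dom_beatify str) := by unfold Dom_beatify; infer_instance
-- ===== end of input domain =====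

-- B replaces A's single five-flag state machine by two passes — a removal-only scanner
-- (drop '&…;' entities and '@'-words) followed by a run-collapsing pass — objective: simpler decomposition.


-- ===== PORT A =====
def pvIsLetter (ch : Char) : Bool := decide ('a'.toNat ≤ ch.toNat) && decide (ch.toNat ≤ 'z'.toNat)

def pvIsOK (ch : Char) : Bool := pvIsLetter ch || PySem.Chars.isdigit ch

-- A's loop state: (prevSpace, ampRegime, dogRegime, WordDeleted, res)
def pvStepA (st : Bool × Bool × Bool × Bool × List Char) (ch : Char) :
    Bool × Bool × Bool × Bool × List Char :=
  let (prevSpace, amp, dog, wd, res) := st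
  if !(amp || dog) then
    if ch = '&' then (prevSpace, true, dog, wd, res)
    else if ch = '@' then (prevSpace, amp, true, false, res)
    else if PySem.Chars.isspace ch then
      if !prevSpace then (true, amp, dog, wd, res ++ [' ']) else (prevSpace, amp, dog, wd, res)
    else if !pvIsOK ch then
      if !prevSpace then (true, amp, dog, wd, res ++ [' ']) else (prevSpace, amp, dog, wd, res)
    else (false, amp, dog, wd, res ++ [ch])
  else if amp then
    if ch = ';' then (prevSpace, false, dog, wd, res) else (prevSpace, amp, dog, wd, res)
  else
    if pvIsOK ch then (prevSpace, amp, dog, true, res)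
    else if PySem.Chars.isspace ch then
      if wd then (prevSpace, amp, false, wd, res) else (prevSpace, amp, dog, wd, res)
    else (prevSpace, amp, dog, wd, res)

def beatify (str : String) : String :=
  String.ofList (PySem.Chars.strip
    (List.foldl pvStepA (false, false, false, false, [])
      (PySem.Chars.lower (PySem.Chars.strip str.toList))).2.2.2.2)

-- ===== PORT B =====
-- pass 1 inner while-loop over '&…;': consume up to and including the first ';'
def pvSkipAmp : List Char → List Char
  | [] => []
  | c :: cs => if c = ';' then cs else pvSkipAmp cs

-- pass 1 inner while-loop over an '@'-word: consume until whitespace after at least one OK char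
def pvSkipDog : Bool → List Char → List Char
  | _, [] => []
  | seen, c :: cs =>
    if pvIsOK c then pvSkipDog true cs
    else if PySem.Chars.isspace c && seen then cs
    else pvSkipDog seen cs

-- pass 1 outer while-loop (fuel = number of remaining loop iterations, bounded by the length)
def pvPass1Go : Nat → List Char → List Char
  | 0, _ => []
  | _, [] => []
  | fuel + 1, c :: cs =>
    if c = '&' then pvPass1Go fuel (pvSkipAmp cs)
    else if c = '@' then pvPass1Go fuel (pvSkipDog false cs)
    else c :: pvPass1Go fuel cs

def pvPass1 (cs : List Char) : List Char := pvPass1Go cs.length cs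

-- pass 2 inner while-loop: skip the rest of a run of non-OK chars
def pvSkipNotOK : List Char → List Char
  | [] => []
  | c :: cs => if pvIsOK c then c :: cs else pvSkipNotOK cs

-- pass 2 outer while-loop
def pvPass2Go : Nat → List Char → List Char
  | 0, _ => []
  | _, [] => []
  | fuel + 1, c :: cs =>
    if pvIsOK c then c :: pvPass2Go fuel cs
    else ' ' :: pvPass2Go fuel (pvSkipNotOK cs)

def pvPass2 (cs : List Char) : List Char := pvPass2Go cs.length cs

def beatify_alt (str : String) : String :=
  String.ofList (PySem.Chars.strip
    (pvPass2 (pvPass1 (PySem.Chars.lower (PySem.Chars.strip str.toList)))))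

-- ===== PRECONDITION & SPEC =====
def Spec_beatify (str : String) (out : String) : Prop := out = beatify_alt str
instance (str : String) (out : String) : Decidable (Spec_beatify str out) := by unfold Spec_beatify; infer_instance

-- ===== CLAIM (what is proved, stated in full; the proofs are below) =====
def Claim_equal_beatify : Prop := ∀ (str : String), Dom_beatify str → Spec_beatify str (beatify str)

-- ===== LEMMAS AND PROOFS =====

theorem pvSkipAmp_le (cs : List Char) : (pvSkipAmp cs).length ≤ cs.length := by
  induction cs with
  | nil => simp [pvSkipAmp]
  | cons c cs ih => simp only [pvSkipAmp, List.length_cons]; split <;> omega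

theorem pvSkipDog_le (b : Bool) (cs : List Char) : (pvSkipDog b cs).length ≤ cs.length := by
  induction cs generalizing b with
  | nil => simp [pvSkipDog]
  | cons c cs ih =>
    simp only [pvSkipDog]; split
    · exact le_trans (ih true) (by simp)
    · split
      · simp
      · exact le_trans (ih b) (by simp)

theorem pvSkipNotOK_le (cs : List Char) : (pvSkipNotOK cs).length ≤ cs.length := by
  induction cs with
  | nil => simp [pvSkipNotOK]
  | cons c cs ih =>
    simp only [pvSkipNotOK]
    split
    · exact le_refl _
    · exact le_trans ih (by simp only [List.length_cons]; omega)

-- A's emission behaviour on the kept (normal-mode) characters, with A's branch order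
def pvColl (ps : Bool) (res : List Char) : List Char → List Char
  | [] => res
  | c :: cs =>
    if PySem.Chars.isspace c then
      if !ps then pvColl true (res ++ [' ']) cs else pvColl true res cs
    else if !pvIsOK c then
      if !ps then pvColl true (res ++ [' ']) cs else pvColl true res cs
    else pvColl false (res ++ [c]) cs

theorem pvOK_not_space (c : Char) (h : pvIsOK c = true) : PySem.Chars.isspace c = false := by
  have hc : 48 ≤ c.toNat ∧ c.toNat ≤ 122 := by
    simp only [pvIsOK, pvIsLetter, PySem.Chars.isdigit, Bool.or_eq_true, Bool.and_eq_true,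
      decide_eq_true_eq] at h
    have h97 : 'a'.toNat = 97 := rfl
    have h122 : 'z'.toNat = 122 := rfl
    rcases h with ⟨h1, h2⟩ | ⟨h1, h2⟩
    · omega
    · have g1 : '0'.toNat ≤ c.toNat := UInt32.le_iff_toNat_le.mp h1
      have g2 : c.toNat ≤ '9'.toNat := UInt32.le_iff_toNat_le.mp h2
      have h48 : '0'.toNat = 48 := rfl
      have h57 : '9'.toNat = 57 := rfl
      omega
  simp [PySem.Chars.isspace]
  omega

-- while in ampRegime, A just scans to the first ';'
theorem pvFold_amp (cs : List Char) (ps wd : Bool) (res : List Char) :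
    (List.foldl pvStepA (ps, true, false, wd, res) cs).2.2.2.2
      = (List.foldl pvStepA (ps, false, false, wd, res) (pvSkipAmp cs)).2.2.2.2 := by
  induction cs with
  | nil => simp [pvSkipAmp]
  | cons c cs ih =>
    by_cases h : c = ';' <;> simp [pvStepA, pvSkipAmp, h, ih]

-- while in dogRegime, A scans as pvSkipDog does; afterwards WordDeleted is irrelevant to res
theorem pvFold_dog (cs : List Char) (ps seen : Bool) (res : List Char) :
    (List.foldl pvStepA (ps, false, true, seen, res) cs).2.2.2.2
      = (List.foldl pvStepA (ps, false, false, true, res) (pvSkipDog seen cs)).2.2.2.2 := by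
  induction cs generalizing seen with
  | nil => simp [pvSkipDog]
  | cons c cs ih =>
    by_cases hok : pvIsOK c
    · simp [pvStepA, pvSkipDog, hok, ih true]
    · by_cases hsp : PySem.Chars.isspace c
      · cases seen <;> simp [pvStepA, pvSkipDog, hok, hsp, ih false]
      · simp [pvStepA, pvSkipDog, hok, hsp, ih seen]

-- the main invariant: A's fold equals pvColl applied to the pass-1 remainder
theorem pvFold_main (n : Nat) (cs : List Char) (hn : cs.length ≤ n) (ps wd : Bool)
    (res : List Char) :
    (List.foldl pvStepA (ps, false, false, wd, res) cs).2.2.2.2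
      = pvColl ps res (pvPass1Go n cs) := by
  induction n generalizing cs ps wd res with
  | zero =>
    cases cs with
    | nil => simp [pvPass1Go, pvColl]
    | cons c cs => simp at hn
  | succ n ih =>
    cases cs with
    | nil => simp [pvPass1Go, pvColl]
    | cons c cs =>
      simp only [List.length_cons, Nat.succ_le_succ_iff] at hn
      rw [List.foldl_cons]
      by_cases hamp : c = '&'
      · subst hamp
        have hstep : pvStepA (ps, false, false, wd, res) '&' = (ps, true, false, wd, res) := rfl
        rw [hstep, pvFold_amp, ih _ (le_trans (pvSkipAmp_le cs) hn)]
        simp [pvPass1Go]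
      · by_cases hdog : c = '@'
        · subst hdog
          have hstep : pvStepA (ps, false, false, wd, res) '@' = (ps, false, true, false, res) := rfl
          rw [hstep, pvFold_dog, ih _ (le_trans (pvSkipDog_le false cs) hn)]
          simp [pvPass1Go]
        · have hp1 : pvPass1Go (n + 1) (c :: cs) = c :: pvPass1Go n cs := by
            simp [pvPass1Go, hamp, hdog]
          rw [hp1]
          by_cases hsp : PySem.Chars.isspace c <;> by_cases hok : pvIsOK c <;> cases ps <;>
            simp [pvStepA, pvColl, hamp, hdog, hsp, hok, ih _ hn]

-- the fuel argument of pass 2 is irrelevant once it covers the list length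
theorem pvPass2Go_fuel (f : Nat) : ∀ (g : Nat) (cs : List Char),
    cs.length ≤ f → cs.length ≤ g → pvPass2Go f cs = pvPass2Go g cs := by
  induction f with
  | zero =>
    intro g cs h1 _
    cases cs with
    | nil => cases g <;> simp [pvPass2Go]
    | cons c cs => simp at h1
  | succ f ih =>
    intro g cs h1 h2
    cases cs with
    | nil => cases g <;> simp [pvPass2Go]
    | cons c cs =>
      cases g with
      | zero => simp at h2
      | succ g =>
        simp only [List.length_cons, Nat.succ_le_succ_iff] at h1 h2
        by_cases hok : pvIsOK c <;>
          simp [pvPass2Go, hok, ih g cs h1 h2,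
            ih g (pvSkipNotOK cs) (le_trans (pvSkipNotOK_le cs) h1)
              (le_trans (pvSkipNotOK_le cs) h2)]

-- pvColl equals pass 2 (run-collapsing), in both prevSpace modes
theorem pvColl_pass2 (f : Nat) (kept : List Char) (hf : kept.length ≤ f) :
    (∀ res, pvColl false res kept = res ++ pvPass2Go f kept) ∧
    (∀ res, pvColl true res kept = res ++ pvPass2Go f (pvSkipNotOK kept)) := by
  induction f generalizing kept with
  | zero =>
    cases kept with
    | nil => simp [pvColl, pvPass2Go]
    | cons c cs => simp at hf
  | succ f ih =>
    cases kept with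
    | nil => simp [pvColl, pvPass2Go, pvSkipNotOK]
    | cons c cs =>
      simp only [List.length_cons, Nat.succ_le_succ_iff] at hf
      by_cases hok : pvIsOK c
      · have hsp := pvOK_not_space c hok
        have h2 : pvPass2Go (f + 1) (pvSkipNotOK (c :: cs)) = pvPass2Go (f + 1) (c :: cs) := by
          simp [pvSkipNotOK, hok]
        constructor <;> intro res
        · simp [pvColl, pvPass2Go, hok, hsp, ((ih cs hf).1 _)]
        · rw [h2]; simp [pvColl, pvPass2Go, hok, hsp, ((ih cs hf).1 _)]
      · have hfuel : pvPass2Go (f + 1) (pvSkipNotOK cs) = pvPass2Go f (pvSkipNotOK cs) :=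
          pvPass2Go_fuel (f + 1) f (pvSkipNotOK cs)
            (le_trans (pvSkipNotOK_le cs) (Nat.le_succ_of_le hf))
            (le_trans (pvSkipNotOK_le cs) hf)
        constructor <;> intro res
        · cases hsp : PySem.Chars.isspace c <;>
            simp [pvColl, pvPass2Go, hok, hsp, ((ih cs hf).2 _)]
        · have h3 : pvSkipNotOK (c :: cs) = pvSkipNotOK cs := by simp [pvSkipNotOK, hok]
          rw [h3, hfuel]
          cases hsp : PySem.Chars.isspace c <;>
            simp [pvColl, hok, hsp, ((ih cs hf).2 _)]

-- ===== VERDICT (by name: the statement is the Claim_ definition above) =====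
theorem beatify_spec : Claim_equal_beatify := by
  intro str _
  show beatify str = beatify_alt str
  unfold beatify beatify_alt pvPass1 pvPass2
  rw [pvFold_main _ _ le_rfl, (pvColl_pass2 _ _ le_rfl).1]
  simp
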